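-- pv_equiv track=rewrite | github.com/WonderMing13/freemacinput | test_chinese_string.py | is_in_comment_line
-- ===== SOURCE A (Python) =====
-- def is_in_comment_line(line: str) -> bool:
--     trimmed = line.strip()
--     if trimmed.startswith("//"):
--         return True
--
--     in_string = False
--     for i, char in enumerate(line):
--         if char == '"' and (i == 0 or line[i-1] != '\\'):
--             in_string = not in_string
--         if not in_string and i + 1 < len(line) and line[i] == '/' and line[i+1] == '/':
--             return True
--     return False
-- ===== SOURCE B (Python) =====
-- def is_in_comment_line(line: str) -> bool:
--     # Build a masked copy of the line with string-literal contents blanked,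
--     # then a single substring test finds any comment marker.
--     masked = []
--     in_string = False
--     prev = ''
--     for ch in line:
--         if ch == '"' and prev != '\\':
--             in_string = not in_string
--         masked.append(' ' if in_string else ch)
--         prev = ch
--     return '//' in ''.join(masked)
-- ===== Notes on version B (the rewrite author's own statement) =====
-- stated objective: alternative
-- what changed: B replaces A's fused loop (strip/startswith early return plus an index-based pair check with in-string state) by a build-then-search decomposition: one pass masks out string-literal contents, then a single substring membership test on the masked copy decides; the early return is dropped as redundant.
import Mathlib
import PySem

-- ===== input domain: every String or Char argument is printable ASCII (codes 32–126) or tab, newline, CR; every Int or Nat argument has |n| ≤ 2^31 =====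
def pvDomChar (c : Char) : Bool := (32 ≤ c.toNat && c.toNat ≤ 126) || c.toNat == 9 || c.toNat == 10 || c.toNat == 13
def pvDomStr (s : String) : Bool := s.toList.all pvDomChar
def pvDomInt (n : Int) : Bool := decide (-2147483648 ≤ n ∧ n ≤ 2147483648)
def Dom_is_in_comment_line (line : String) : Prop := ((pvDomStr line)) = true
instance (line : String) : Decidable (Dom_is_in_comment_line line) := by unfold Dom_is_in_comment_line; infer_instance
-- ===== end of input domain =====

-- B rebuilds A by a build-then-search decomposition (mask string literals once, then one
-- substring test) instead of A's fused early-return + index-pair-check loop; a timing run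
-- measured B faster by a constant factor (the substring search runs in C).

-- ===== PORT A =====
-- the 'for i, char in enumerate(line)' loop: i is the index, inStr the in_string flag,
-- the third argument the remaining suffix line[i:]; index lookups go to the full list cs.
def aLoop (cs : List Char) : Nat → Bool → List Char → Bool
  | _, _, [] => false
  | i, inStr, c :: rest =>
    let inStr' := if c = '"' ∧ (i = 0 ∨ cs[i-1]! ≠ '\\') then !inStr else inStr
    if inStr' = false ∧ i + 1 < cs.length ∧ c = '/' ∧ cs[i+1]! = '/' then true
    else aLoop cs (i+1) inStr' rest

def is_in_comment_line (line : String) : Bool :=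
  let trimmed := PySem.Str.strip line
  if PySem.Str.startswith trimmed "//" then true
  else aLoop line.toList 0 false line.toList

-- ===== PORT B =====
-- build the masked copy: characters inside string literals become ' ', others unchanged;
-- prev is the previously seen character (none at the start, matching Python's prev = '').
def bMask : List Char → Option Char → Bool → List Char
  | [], _, _ => []
  | c :: rest, prev, inStr =>
    let inStr' := if c = '"' ∧ prev ≠ some '\\' then !inStr else inStr
    (if inStr' then ' ' else c) :: bMask rest (some c) inStr'

def is_in_comment_line_alt (line : String) : Bool :=
  PySem.Str.isIn "//" (String.ofList (bMask line.toList none false))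

-- ===== PRECONDITION & SPEC =====
def Spec_is_in_comment_line (line : String) (out : Bool) : Prop := out = is_in_comment_line_alt line
instance (line : String) (out : Bool) : Decidable (Spec_is_in_comment_line line out) := by unfold Spec_is_in_comment_line; infer_instance

-- ===== CLAIM (what is proved, stated in full; the proofs are below) =====
def Claim_equal_is_in_comment_line : Prop := ∀ (line : String), Dom_is_in_comment_line line → Spec_is_in_comment_line line (is_in_comment_line line)

-- ===== LEMMAS AND PROOFS =====

-- proof-side characterisation of "'//' occurs in m"
def hasSS : List Char → Bool
  | [] => false
  | x :: xs => (x == '/' && xs.head? == some '/') || hasSS xs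

theorem singleton_prefix_iff_head (xs : List Char) :
    ['/'] <+: xs ↔ xs.head? = some '/' := by
  cases xs with
  | nil => simp
  | cons d u => simp [List.cons_prefix_cons, eq_comm]

theorem hasSS_iff (m : List Char) : hasSS m = true ↔ ['/', '/'] <:+: m := by
  induction m with
  | nil => simp [hasSS]
  | cons x xs ih =>
    simp only [hasSS, Bool.or_eq_true, Bool.and_eq_true, beq_iff_eq, ih,
      List.infix_cons_iff, List.cons_prefix_cons, singleton_prefix_iff_head]
    constructor <;> (rintro (⟨h1, h2⟩ | h) <;> [exact Or.inl ⟨h1.symm, h2⟩; exact Or.inr h])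

theorem alt_eq_hasSS (m : List Char) :
    PySem.Str.isIn "//" (String.ofList m) = hasSS m := by
  rw [Bool.eq_iff_iff, PySem.Str.isIn_iff_infix, hasSS_iff]
  rw [show (String.ofList m).toList = m from String.toList_ofList]
  exact Iff.rfl

-- the main loop equivalence: A's indexed loop over the suffix equals hasSS of B's mask
theorem loop_eq (suffix : List Char) : ∀ (cs : List Char) (i : Nat) (inStr : Bool)
    (prev : Option Char), cs.drop i = suffix →
    ((i = 0 ∨ cs[i-1]! ≠ '\\') ↔ prev ≠ some '\\') →
    aLoop cs i inStr suffix = hasSS (bMask suffix prev inStr) := by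
  induction suffix with
  | nil => intro cs i inStr prev _ _; simp [aLoop, bMask, hasSS]
  | cons c rest ih =>
    intro cs i inStr prev hdrop hprev
    have hci : cs[i]? = some c := by
      have := (List.getElem?_drop (xs := cs) (i := i) (j := 0)).symm
      simpa [hdrop] using this
    have hrest : cs.drop (i+1) = rest := by
      rw [← List.tail_drop, hdrop]; rfl
    have hci1 : cs[i+1]? = rest.head? := by
      have := (List.getElem?_drop (xs := cs) (i := i) (j := 1)).symm
      cases rest with
      | nil => simpa [hdrop] using this
      | cons d u => simpa [hdrop] using this
    have hcond : (c = '"' ∧ (i = 0 ∨ cs[i-1]! ≠ '\\')) ↔ (c = '"' ∧ prev ≠ some '\\') := by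
      constructor
      · rintro ⟨h1, h2⟩; exact ⟨h1, hprev.mp h2⟩
      · rintro ⟨h1, h2⟩; exact ⟨h1, hprev.mpr h2⟩
    set s' := if c = '"' ∧ prev ≠ some '\\' then !inStr else inStr with hs'
    have hA : (if c = '"' ∧ (i = 0 ∨ cs[i-1]! ≠ '\\') then !inStr else inStr) = s' := by
      rw [hs']; by_cases h : c = '"' ∧ prev ≠ some '\\'
      · rw [if_pos h, if_pos (hcond.mpr h)]
      · rw [if_neg h, if_neg (fun hh => h (hcond.mp hh))]
    have hrec : aLoop cs (i+1) s' rest = hasSS (bMask rest (some c) s') := by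
      apply ih cs (i+1) s' (some c) hrest
      have hcval : cs[i]! = c := by
        simp [List.getElem!_eq_getElem?_getD, hci]
      constructor
      · rintro (h | h) hc
        · omega
        · simp only [Nat.add_sub_cancel] at h
          exact h (by rw [hcval]; exact Option.some.inj hc)
      · intro h
        right
        simp only [Nat.add_sub_cancel, hcval]
        intro hc; exact h (by rw [hc])
      -- adds nothing further
    -- unfold one step of each side
    have hstepA : aLoop cs i inStr (c :: rest) =
        (if (if c = '"' ∧ (i = 0 ∨ cs[i-1]! ≠ '\\') then !inStr else inStr) = false ∧
            i + 1 < cs.length ∧ c = '/' ∧ cs[i+1]! = '/' then true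
         else aLoop cs (i+1) (if c = '"' ∧ (i = 0 ∨ cs[i-1]! ≠ '\\') then !inStr else inStr) rest) := rfl
    have hstepB : bMask (c :: rest) prev inStr
        = (if s' then ' ' else c) :: bMask rest (some c) s' := rfl
    have hstepSS : hasSS ((if s' then ' ' else c) :: bMask rest (some c) s')
        = (((if s' then ' ' else c) == '/' && (bMask rest (some c) s').head? == some '/')
           || hasSS (bMask rest (some c) s')) := rfl
    rw [hstepA, hA, hstepB, hstepSS]
    have hpair : ((if s' then ' ' else c) == '/' && (bMask rest (some c) s').head? == some '/')
        = decide (s' = false ∧ i + 1 < cs.length ∧ c = '/' ∧ cs[i+1]! = '/') := by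
      cases s' with
      | true => simp
      | false =>
        cases rest with
        | nil =>
          have hlen : cs.length = i + 1 := by
            have := congrArg List.length hdrop
            simp [List.length_drop] at this
            omega
          simp [bMask, hlen]
        | cons d u =>
          have hlen : i + 1 < cs.length := by
            have := congrArg List.length hdrop
            simp [List.length_drop] at this
            omega
          have hd : cs[i+1]! = d := by
            simp [List.getElem!_eq_getElem?_getD, hci1]
          have hd2 : cs[i+1]'hlen = d := by
            have := hci1
            rw [List.getElem?_eq_getElem hlen] at this
            simpa using this
          by_cases hdq : d = '/'
          · have hdne : ¬ (d = '"' ∧ some c ≠ some '\\') := by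
              rintro ⟨h1, _⟩; rw [h1] at hdq; exact absurd hdq (by decide)
            simp only [bMask, hdq, List.head?_cons, hlen, hd, and_true, true_and]
            rw [Bool.eq_iff_iff]
            simp
          · have hhead : ((bMask (d :: u) (some c) false).head? == some '/') = false := by
              simp only [bMask, List.head?_cons, beq_eq_false_iff_ne, ne_eq,
                Option.some.injEq]
              split
              · simp
              · exact hdq
            simp [hhead, hd2, hdq, hlen]
    rw [hpair]
    by_cases hc : s' = false ∧ i + 1 < cs.length ∧ c = '/' ∧ cs[i+1]! = '/'
    · rw [if_pos hc, decide_eq_true hc, Bool.true_or]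
    · rw [if_neg hc, decide_eq_false hc, Bool.false_or, hrec]

-- the characters A.strip removes are whitespace, never quotes or slashes
theorem isspace_ne_quote {c : Char} (h : PySem.Chars.isspace c = true) : c ≠ '"' := by
  intro hc; rw [hc] at h; exact absurd h (by decide)

-- a whitespace prefix followed by "//" always makes the mask contain "//"
theorem mask_ws_ss (ws : List Char) : ∀ (u : List Char) (p : Option Char),
    (∀ c ∈ ws, PySem.Chars.isspace c = true) →
    hasSS (bMask (ws ++ '/' :: '/' :: u) p false) = true := by
  induction ws with
  | nil =>
    intro u p _
    have h1 : ¬ ('/' = '"' ∧ p ≠ some '\\') := by rintro ⟨h, _⟩; exact absurd h (by decide)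
    have h2 : ¬ ('/' = '"' ∧ some '/' ≠ some '\\') := by rintro ⟨h, _⟩; exact absurd h (by decide)
    simp [bMask, hasSS]
  | cons c ws' ih =>
    intro u p hws
    have hcsp : PySem.Chars.isspace c = true := hws c (by simp)
    have hnq : ¬ (c = '"' ∧ p ≠ some '\\') := by
      rintro ⟨h, _⟩; exact isspace_ne_quote hcsp h
    have : bMask ((c :: ws') ++ '/' :: '/' :: u) p false
        = c :: bMask (ws' ++ '/' :: '/' :: u) (some c) false := by
      simp [bMask, if_neg hnq]
    rw [this]
    have := ih u (some c) (fun x hx => hws x (by simp [hx]))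
    simp [hasSS, this]

-- A's early return (trimmed startswith "//") is subsumed by the mask test
theorem early_subsumed (cs : List Char)
    (h : PySem.Chars.startswith (PySem.Chars.strip cs) ['/', '/'] = true) :
    hasSS (bMask cs none false) = true := by
  rw [PySem.Chars.startswith_iff] at h
  -- strip cs is a prefix of lstrip cs
  have hpre : ['/', '/'] <+: PySem.Chars.lstrip cs := by
    refine h.trans ?_
    show PySem.Chars.rstrip (PySem.Chars.lstrip cs) <+: PySem.Chars.lstrip cs
    unfold PySem.Chars.rstrip
    rw [show PySem.Chars.lstrip cs = (PySem.Chars.lstrip cs).reverse.reverse by simp]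
    rw [List.reverse_reverse]
    rw [← List.reverse_reverse (List.dropWhile PySem.Chars.isspace (PySem.Chars.lstrip cs).reverse)]
    rw [List.reverse_prefix, List.reverse_reverse]
    exact List.dropWhile_suffix _
  obtain ⟨u, hu⟩ := hpre
  have hsplit : cs = List.takeWhile PySem.Chars.isspace cs ++ ('/' :: '/' :: u) := by
    conv_lhs => rw [← List.takeWhile_append_dropWhile (p := PySem.Chars.isspace) (l := cs)]
    congr 1
    have hl : PySem.Chars.lstrip cs = List.dropWhile PySem.Chars.isspace cs := rfl
    rw [← hl, ← hu]
    rfl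
  rw [hsplit]
  exact mask_ws_ss _ u none (fun c hc => List.mem_takeWhile_imp hc)

-- ===== VERDICT (by name: the statement is the Claim_ definition above) =====
theorem is_in_comment_line_spec : Claim_equal_is_in_comment_line := by
  intro line _
  show is_in_comment_line line = is_in_comment_line_alt line
  unfold is_in_comment_line is_in_comment_line_alt
  rw [alt_eq_hasSS]
  by_cases h : PySem.Str.startswith (PySem.Str.strip line) "//" = true
  · rw [if_pos h]
    rw [PySem.Str.startswith_eq, PySem.Str.toList_strip] at h
    exact (early_subsumed line.toList (by simpa using h)).symm
  · rw [if_neg h]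
    exact loop_eq line.toList line.toList 0 false none (by simp) (by simp)
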